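-- pv_equiv track=rewrite | github.com/01101010o/generador | listas.py | eliminarUNO
-- ===== SOURCE A (Python) =====
-- def eliminarUNO(lista,x):
-- 	posiciones = []
-- 	for i in range(len(lista)):
-- 		if lista[i] == x:
-- 			if lista[i-1] == '1':
-- 				posiciones.append(i-1)
-- 	for f in range(len(posiciones)-1, -1, -1):
-- 		del lista[posiciones[f]]
-- 	return lista
-- ===== SOURCE B (Python) =====
-- def eliminarUNO(lista, x):
--     out = [v for v, nxt in zip(lista, lista[1:]) if not (v == '1' and nxt == x)]
--     if lista:
--         out.append(lista[-1])
--     return out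
-- ===== Notes on version B (the rewrite author's own statement) =====
-- stated objective: simpler
-- what changed: A collects indices of '1'-elements preceding x in one indexed pass and then deletes them one by one with del; B builds the result in a single comprehension over adjacent pairs (zip with the shifted list), keeping each element unless it is '1' and immediately followed by x.
-- intended difference: On a nonempty list whose first element equals x and whose last element is '1', A's lista[i-1] check wraps around at i=0 and deletes the final element (A(['a','1'],'a') = ['a']); B deletes nothing for the first element since it has no predecessor (B returns ['a','1']), which is the intended behaviour. — e.g. on eliminarUNO(["a", "1"], "a"): A returns ["a"], B returns ["a", "1"]
import Mathlib
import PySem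

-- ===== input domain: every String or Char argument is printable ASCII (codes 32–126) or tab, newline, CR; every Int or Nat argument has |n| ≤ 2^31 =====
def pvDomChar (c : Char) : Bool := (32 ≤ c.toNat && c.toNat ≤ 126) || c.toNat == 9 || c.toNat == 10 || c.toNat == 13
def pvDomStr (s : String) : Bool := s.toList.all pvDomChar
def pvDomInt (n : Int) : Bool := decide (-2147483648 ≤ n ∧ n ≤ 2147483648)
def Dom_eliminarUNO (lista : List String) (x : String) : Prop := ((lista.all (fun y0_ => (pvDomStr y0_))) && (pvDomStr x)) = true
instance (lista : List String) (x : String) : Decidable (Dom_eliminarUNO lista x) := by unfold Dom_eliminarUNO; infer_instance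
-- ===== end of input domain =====

-- B replaces A's collect-then-delete double pass with one pass over adjacent pairs.
-- A mutates `lista` in place and returns it; B builds a fresh list — the equivalence
-- proved here is about the RETURN value only.

-- ===== PORT A =====
-- Python `del cur[p]`: exact where Python does not raise; the `none` branch (IndexError)
-- is unreachable on the indices A collects.
def pyDel (cur : List String) (p : Int) : List String :=
  match PySem.List.pop? cur p with
  | some r => r.2
  | none => cur

def eliminarUNO (lista : List String) (x : String) : List String :=
  let posiciones : List Int :=
    (PySem.List.pyRange 0 (lista.length : Int)).foldl (fun acc i =>
      if (PySem.List.pyGet? lista i).getD "" = x then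
        if (PySem.List.pyGet? lista (i - 1)).getD "" = "1" then acc ++ [i - 1] else acc
      else acc) []
  (PySem.List.pyRange ((posiciones.length : Int) - 1) (-1) (-1)).foldl
    (fun cur f => pyDel cur ((PySem.List.pyGet? posiciones f).getD 0)) lista

-- ===== PORT B =====
def eliminarUNO_alt (lista : List String) (x : String) : List String :=
  let out := ((lista.zip (PySem.List.slice lista (some 1) none)).filter
      (fun p => !(p.1 == "1" && p.2 == x))).map Prod.fst
  if lista.isEmpty then out
  else out ++ [(PySem.List.pyGet? lista (-1)).getD ""]

-- ===== PRECONDITION & SPEC =====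
-- On a nonempty list whose first element is x and whose last element is '1', A's check
-- `lista[i-1]` wraps around at i=0 and deletes the FINAL element; B deletes nothing for
-- the first element (it has no predecessor), which is the intended behaviour.
def D_eliminarUNO (lista : List String) (x : String) : Prop :=
  lista ≠ [] ∧ lista.head? = some x ∧ lista.getLast? = some "1"
instance (lista : List String) (x : String) : Decidable (D_eliminarUNO lista x) := by
  unfold D_eliminarUNO; infer_instance

def Spec_eliminarUNO (lista : List String) (x : String) (out : List String) : Prop :=
  ¬ D_eliminarUNO lista x → out = eliminarUNO_alt lista x
instance (lista : List String) (x : String) (out : List String) : Decidable (Spec_eliminarUNO lista x out) := by unfold Spec_eliminarUNO; infer_instance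

def pvDiffWitness_eliminarUNO : List String × String := (["a", "1"], "a")
def pvDiffWitnessOut_eliminarUNO : (List String) × (List String) := (["a"], ["a", "1"])

-- ===== CLAIM (what is proved, stated in full; the proofs are below) =====
def Claim_unchanged_eliminarUNO : Prop := ∀ (lista : List String) (x : String), Dom_eliminarUNO lista x → Spec_eliminarUNO lista x (eliminarUNO lista x)
def Claim_changed_eliminarUNO : Prop := Dom_eliminarUNO (pvDiffWitness_eliminarUNO.1) (pvDiffWitness_eliminarUNO.2) ∧ D_eliminarUNO (pvDiffWitness_eliminarUNO.1) (pvDiffWitness_eliminarUNO.2) ∧ eliminarUNO (pvDiffWitness_eliminarUNO.1) (pvDiffWitness_eliminarUNO.2) = pvDiffWitnessOut_eliminarUNO.1 ∧ eliminarUNO_alt (pvDiffWitness_eliminarUNO.1) (pvDiffWitness_eliminarUNO.2) = pvDiffWitnessOut_eliminarUNO.2 ∧ pvDiffWitnessOut_eliminarUNO.1 ≠ pvDiffWitnessOut_eliminarUNO.2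
def Claim_exact_eliminarUNO : Prop := ∀ (lista : List String) (x : String), Dom_eliminarUNO lista x → D_eliminarUNO lista x → eliminarUNO lista x ≠ eliminarUNO_alt lista x

-- ===== LEMMAS AND PROOFS =====

-- the common value of both programs: keep each element unless it is "1" and followed by x
def gpair (x : String) : List String → List String
  | [] => []
  | [a] => [a]
  | a :: b :: t => if a = "1" ∧ b = x then gpair x (b :: t) else a :: gpair x (b :: t)

-- keep the elements of l (whose first element carries global index k) whose index is not in ps
def idxKeep (l : List String) (ps : List Nat) (k : Nat) : List String :=
  match l with
  | [] => []
  | a :: t => if k ∈ ps then idxKeep t ps (k + 1) else a :: idxKeep t ps (k + 1)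

-- the condition A tests at loop index j
def pxB (lista : List String) (x : String) (j : Nat) : Bool :=
  ((PySem.List.pyGet? lista (j : Int)).getD "" == x) &&
  ((PySem.List.pyGet? lista ((j : Int) - 1)).getD "" == "1")

-- the indices A deletes, apart from the i = 0 wraparound contribution
def SList (lista : List String) (x : String) : List Nat :=
  (List.range (lista.length - 1)).filter
    (fun k => ((lista[k+1]?).getD "" == x) && ((lista[k]?).getD "" == "1"))

theorem pyDel_natCast (cur : List String) (j : Nat) : pyDel cur (j : Int) = cur.eraseIdx j := by
  by_cases h : j < cur.length
  · simp [pyDel, PySem.List.pop?_natCast cur j h]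
  · have h1 : cur.eraseIdx j = cur := List.eraseIdx_of_length_le (by omega)
    have h2 : PySem.List.pop? cur (j : Int) = none := by
      simp [PySem.List.pop?, PySem.List.pyIdx?]
      omega
    simp [pyDel, h2, h1]

theorem pyDel_neg_one (cur : List String) : pyDel cur (-1) = cur.dropLast := by
  rcases List.eq_nil_or_concat cur with h | ⟨l', b, h⟩
  · subst h; rfl
  · subst h
    simp [pyDel, PySem.List.pop?_last]

theorem idxKeep_nil (l : List String) (k : Nat) : idxKeep l [] k = l := by
  induction l generalizing k with
  | nil => rfl
  | cons a t ih => simp [idxKeep, ih]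

theorem idxKeep_congr (ps ps' : List Nat) (l : List String) (k : Nat)
    (h : ∀ m, k ≤ m → (m ∈ ps ↔ m ∈ ps')) : idxKeep l ps k = idxKeep l ps' k := by
  induction l generalizing k with
  | nil => rfl
  | cons a t ih =>
      have hk := h k le_rfl
      by_cases hm : k ∈ ps
      · simp [idxKeep, hm, hk.mp hm, ih (k+1) (fun m hm' => h m (by omega))]
      · have hm' : k ∉ ps' := fun h' => hm (hk.mpr h')
        simp [idxKeep, hm, hm', ih (k+1) (fun m hm' => h m (by omega))]

theorem erase_idxKeep (ps : List Nat) (p : Nat) (hq : ∀ q ∈ ps, p < q) :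
    ∀ (l : List String) (k : Nat), k ≤ p → p < k + l.length →
    (idxKeep l ps k).eraseIdx (p - k) = idxKeep l (p :: ps) k := by
  intro l
  induction l with
  | nil => intro k h1 h2; simp at h2; omega
  | cons a t ih =>
      intro k h1 h2
      have hknps : k ∉ ps := fun h => absurd (hq _ h) (by omega)
      by_cases hkp : k = p
      · subst hkp
        have : k ∈ k :: ps := List.mem_cons_self
        simp only [idxKeep, if_neg hknps, if_pos this]
        rw [Nat.sub_self, List.eraseIdx_cons_zero]
        exact idxKeep_congr ps (k :: ps) t (k+1)
          (fun m hm => by constructor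
                          · exact fun h => List.mem_cons_of_mem _ h
                          · intro h; rcases List.mem_cons.mp h with h | h
                            · omega
                            · exact h)
      · have hkp' : k < p := lt_of_le_of_ne h1 hkp
        have hknps' : k ∉ p :: ps := by
          intro h; rcases List.mem_cons.mp h with h | h
          · omega
          · exact hknps h
        simp only [idxKeep, if_neg hknps, if_neg hknps']
        have hsub : p - k = (p - (k+1)) + 1 := by omega
        rw [hsub, List.eraseIdx_cons_succ]
        rw [ih (k+1) (by omega) (by simp at h2; omega)]

theorem foldr_erase_eq_idxKeep (ps : List Nat) (l : List String)
    (hp : ps.Pairwise (· < ·)) (hlt : ∀ p ∈ ps, p < l.length) :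
    ps.foldr (fun p cur => cur.eraseIdx p) l = idxKeep l ps 0 := by
  induction ps with
  | nil => simp [idxKeep_nil]
  | cons p ps ih =>
      have hq : ∀ q ∈ ps, p < q := fun q hqm => (List.pairwise_cons.mp hp).1 q hqm
      rw [List.foldr_cons, ih (List.pairwise_cons.mp hp).2 (fun q hqm => hlt q (List.mem_cons_of_mem _ hqm))]
      have := erase_idxKeep ps p hq l 0 (Nat.zero_le _) (by simpa using hlt p List.mem_cons_self)
      simpa using this

theorem idxKeep_eq_gpair (x : String) (lista : List String) (S : List Nat)
    (hS : ∀ k, k ∈ S ↔ (k + 1 < lista.length ∧ (lista[k+1]?).getD "" = x ∧ (lista[k]?).getD "" = "1")) :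
    ∀ (t : List String) (k : Nat), lista.drop k = t → idxKeep t S k = gpair x t := by
  intro t
  induction t with
  | nil => intro k _; rfl
  | cons a t' ih =>
      intro k hdrop
      cases t' with
      | nil =>
          have hlen : lista.length - k = 1 := by
            have := congrArg List.length hdrop; simpa using this
          have hns : k ∉ S := by
            intro h
            have := (hS k).mp h
            omega
          simp [idxKeep, gpair, hns]
      | cons b t'' =>
          have hga : lista[k]? = some a := by
            have : (lista.drop k)[0]? = lista[k+0]? := List.getElem?_drop
            simpa [hdrop] using this.symm
          have hgb : lista[k+1]? = some b := by
            have : (lista.drop k)[1]? = lista[k+1]? := List.getElem?_drop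
            simpa [hdrop] using this.symm
          have hlt : k + 1 < lista.length := by
            have := congrArg List.length hdrop; simp at this; omega
          have hdrop' : lista.drop (k+1) = b :: t'' := by
            have : lista.drop (k+1) = List.drop 1 (lista.drop k) := by
              rw [List.drop_drop]
            simp [this, hdrop]
          have hmem : k ∈ S ↔ (b = x ∧ a = "1") := by
            rw [hS k, hga, hgb]; simp [hlt]
          have hih := ih (k+1) hdrop'
          by_cases hc : a = "1" ∧ b = x
          · have hin : k ∈ S := hmem.mpr ⟨hc.2, hc.1⟩
            have e1 : idxKeep (a :: b :: t'') S k = idxKeep (b :: t'') S (k + 1) := by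
              simp [idxKeep, hin]
            have e2 : gpair x (a :: b :: t'') = gpair x (b :: t'') := by
              simp [gpair, hc]
            rw [e1, hih]; exact e2.symm
          · have hout : k ∉ S := fun h => hc ⟨(hmem.mp h).2, (hmem.mp h).1⟩
            have e1 : idxKeep (a :: b :: t'') S k = a :: idxKeep (b :: t'') S (k + 1) := by
              simp [idxKeep, hout]
            have e2 : gpair x (a :: b :: t'') = a :: gpair x (b :: t'') := by
              simp [gpair, hc]
            rw [e1, hih]; exact e2.symm

theorem alt_eq_gpair (lista : List String) (x : String) :
    eliminarUNO_alt lista x = gpair x lista := by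
  unfold eliminarUNO_alt
  rw [PySem.List.slice_from_one]
  induction lista with
  | nil => rfl
  | cons a t ih =>
      cases t with
      | nil => simp [gpair, PySem.List.pyGet?_neg_one]
      | cons b t' =>
          simp only [List.tail_cons, List.zip_cons_cons, List.filter_cons] at *
          rw [PySem.List.pyGet?_neg_one] at *
          by_cases hc : a = "1" ∧ b = x
          · simp only [gpair, if_pos hc]
            have hb : (!(a == "1" && b == x)) = false := by
              simp [hc.1, hc.2]
            rw [hb]
            simp only [List.isEmpty_cons, if_neg Bool.false_ne_true] at ih ⊢
            simp only [List.getLast?_cons_cons]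
            simpa using ih
          · simp only [gpair, if_neg hc]
            have hb : (!(a == "1" && b == x)) = true := by
              rcases not_and_or.mp hc with h | h <;> simp [h]
            rw [hb]
            simp only [List.isEmpty_cons, if_neg Bool.false_ne_true] at ih ⊢
            simp only [if_true, List.getLast?_cons_cons, List.map_cons, List.cons_append, ih]

theorem gpair_ne_nil (x : String) (lista : List String) (h : lista ≠ []) : gpair x lista ≠ [] := by
  induction lista with
  | nil => exact absurd rfl h
  | cons a t ih =>
      cases t with
      | nil => simp [gpair]
      | cons b t' =>
          have hb := ih (by simp)
          by_cases hc : a = "1" ∧ b = x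
          · simpa [gpair, hc] using hb
          · simp [gpair, hc]

theorem pyRange_desc (m : Nat) :
    PySem.List.pyRange ((m : Int) - 1) (-1) (-1) = (List.range m).map (fun (k : Nat) => (m : Int) - 1 - (k : Int)) := by
  simp only [PySem.List.pyRange]
  norm_num
  have h : (if 0 < m then m else 0) = m := by split <;> omega
  rw [h]
  apply List.map_congr_left
  intro k _
  ring

theorem loop_del (pos : List Int) (l0 : List String) :
    (PySem.List.pyRange ((pos.length : Int) - 1) (-1) (-1)).foldl
      (fun cur f => pyDel cur ((PySem.List.pyGet? pos f).getD 0)) l0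
    = pos.foldr (fun p cur => pyDel cur p) l0 := by
  rw [pyRange_desc pos.length, List.foldl_map]
  have h1 : ∀ (cur : List String) (k : Nat), k ∈ List.range pos.length →
      pyDel cur ((PySem.List.pyGet? pos ((pos.length : Int) - 1 - (k : Int))).getD 0)
      = pyDel cur (pos.getD (pos.length - 1 - k) 0) := by
    intro cur k hk
    have hk' : k < pos.length := List.mem_range.mp hk
    have he : ((pos.length : Int) - 1 - (k : Int)) = ((pos.length - 1 - k : Nat) : Int) := by
      omega
    rw [he, PySem.List.pyGet?_natCast, List.getD_eq_getElem?_getD]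
  have hc : List.foldl (fun cur (k : Nat) => pyDel cur ((PySem.List.pyGet? pos ((pos.length : Int) - 1 - (k : Int))).getD 0)) l0 (List.range pos.length)
      = List.foldl (fun cur (k : Nat) => pyDel cur (pos.getD (pos.length - 1 - k) 0)) l0 (List.range pos.length) :=
    PySem.List.foldl_congr_mem _ _ _ _ h1
  rw [hc]
  have hrev : pos.reverse = (List.range pos.length).map (fun k => pos.getD (pos.length - 1 - k) 0) := by
    apply List.ext_getElem
    · simp
    · intro i h1' h2'
      simp only [List.length_reverse] at h1'
      simp only [List.getElem_reverse, List.getElem_map, List.getElem_range]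
      rw [List.getD_eq_getElem?_getD, List.getElem?_eq_getElem (by omega)]
      rfl
  have h2 : (List.range pos.length).foldl (fun cur k => pyDel cur (pos.getD (pos.length - 1 - k) 0)) l0
      = List.foldl (fun cur p => pyDel cur p) l0 pos.reverse := by
    rw [hrev, List.foldl_map]
  rw [h2, List.foldl_reverse]

theorem posi_eq (lista : List String) (x : String) :
    (PySem.List.pyRange 0 (lista.length : Int)).foldl (fun acc i =>
      if (PySem.List.pyGet? lista i).getD "" = x then
        if (PySem.List.pyGet? lista (i - 1)).getD "" = "1" then acc ++ [i - 1] else acc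
      else acc) []
    = ((List.range lista.length).filter (pxB lista x)).map (fun (j : Nat) => (j : Int) - 1) := by
  rw [PySem.List.pyRange_zero_natCast, List.foldl_map]
  have h1 : ∀ (acc : List Int) (k : Nat), k ∈ List.range lista.length →
      (if (PySem.List.pyGet? lista (k : Int)).getD "" = x then
        if (PySem.List.pyGet? lista ((k : Int) - 1)).getD "" = "1" then acc ++ [(k : Int) - 1] else acc
      else acc)
      = if pxB lista x k then acc ++ [(k : Int) - 1] else acc := by
    intro acc k _
    by_cases c1 : (PySem.List.pyGet? lista (k : Int)).getD "" = x <;>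
      by_cases c2 : (PySem.List.pyGet? lista ((k : Int) - 1)).getD "" = "1" <;>
        simp [pxB, c1, c2]
  have hc : List.foldl (fun acc (k : Nat) =>
        if (PySem.List.pyGet? lista (k : Int)).getD "" = x then
          if (PySem.List.pyGet? lista ((k : Int) - 1)).getD "" = "1" then acc ++ [(k : Int) - 1] else acc
        else acc) [] (List.range lista.length)
      = List.foldl (fun acc (k : Nat) => if pxB lista x k then acc ++ [(k : Int) - 1] else acc) [] (List.range lista.length) :=
    PySem.List.foldl_congr_mem _ _ _ _ h1
  rw [hc]
  rw [PySem.List.foldl_append_if (pxB lista x) (fun (k : Nat) => (k : Int) - 1)]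
  simp

theorem mem_SList (lista : List String) (x : String) (k : Nat) :
    k ∈ SList lista x ↔
      (k + 1 < lista.length ∧ (lista[k+1]?).getD "" = x ∧ (lista[k]?).getD "" = "1") := by
  unfold SList
  simp only [List.mem_filter, List.mem_range, Bool.and_eq_true, beq_iff_eq]
  constructor
  · rintro ⟨h1, h2⟩; exact ⟨by omega, h2⟩
  · rintro ⟨h1, h2⟩; exact ⟨by omega, h2⟩

theorem px0_iff (hd : String) (tl : List String) (x : String) :
    pxB (hd :: tl) x 0 = true ↔ D_eliminarUNO (hd :: tl) x := by
  unfold pxB D_eliminarUNO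
  have e2 : (((0 : Nat) : Int) - 1) = (-1 : Int) := by norm_num
  rw [e2, PySem.List.pyGet?_neg_one]
  rw [show PySem.List.pyGet? (hd :: tl) ((0 : Nat) : Int) = some hd from PySem.List.pyGet?_zero_cons hd tl]
  rw [List.getLast?_eq_some_getLast (l := hd :: tl) (by simp)]
  simp

theorem a_eq (lista : List String) (x : String) :
    eliminarUNO lista x =
      (if D_eliminarUNO lista x then (gpair x lista).dropLast else gpair x lista) := by
  have hSfold : ((SList lista x).map (fun (k : Nat) => (k : Int))).foldr (fun p cur => pyDel cur p) lista
      = gpair x lista := by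
    rw [List.foldr_map]
    have hfn : (fun (k : Nat) (cur : List String) => pyDel cur (k : Int))
        = fun k cur => cur.eraseIdx k := by
      funext k cur; exact pyDel_natCast cur k
    rw [hfn]
    have hp : (SList lista x).Pairwise (· < ·) := List.pairwise_lt_range.filter _
    have hlt : ∀ p ∈ SList lista x, p < lista.length := by
      intro p hpm
      have := (mem_SList lista x p).mp hpm
      omega
    rw [foldr_erase_eq_idxKeep _ _ hp hlt]
    exact idxKeep_eq_gpair x lista _ (mem_SList lista x) lista 0 (by simp)
  cases lista with
  | nil =>
      have hA : eliminarUNO [] x = [] := rfl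
      rw [hA]
      simp [D_eliminarUNO, gpair]
  | cons hd tl =>
      unfold eliminarUNO
      simp only [posi_eq, loop_del]
      have hsplit : ((List.range (hd :: tl).length).filter (pxB (hd :: tl) x)).map (fun (j : Nat) => (j : Int) - 1)
          = (if D_eliminarUNO (hd :: tl) x then [(-1 : Int)] else [])
            ++ (SList (hd :: tl) x).map (fun (k : Nat) => (k : Int)) := by
        have hlen : (hd :: tl).length = tl.length + 1 := by simp
        rw [hlen, List.range_succ_eq_map, List.filter_cons]
        have hrest : (List.filter (pxB (hd :: tl) x) (List.map Nat.succ (List.range tl.length))).map (fun (j : Nat) => (j : Int) - 1)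
            = (SList (hd :: tl) x).map (fun (k : Nat) => (k : Int)) := by
          rw [List.filter_map, List.map_map]
          have hfc : List.filter ((pxB (hd :: tl) x) ∘ Nat.succ) (List.range tl.length)
              = List.filter (fun k => (((hd :: tl)[k+1]?).getD "" == x) && (((hd :: tl)[k]?).getD "" == "1")) (List.range tl.length) := by
            apply List.filter_congr
            intro k _
            simp only [Function.comp]
            unfold pxB
            have e1 : PySem.List.pyGet? (hd :: tl) ((Nat.succ k : Nat) : Int) = (hd :: tl)[k+1]? := by
              rw [PySem.List.pyGet?_natCast]
            have e2 : ((Nat.succ k : Nat) : Int) - 1 = ((k : Nat) : Int) := by push_cast; ring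
            rw [e1, e2, PySem.List.pyGet?_natCast]
          rw [hfc]
          unfold SList
          have hl1 : (hd :: tl).length - 1 = tl.length := by simp
          rw [hl1]
          apply List.map_congr_left
          intro k _
          simp only [Function.comp]
          push_cast
          ring
        by_cases hD : D_eliminarUNO (hd :: tl) x
        · rw [if_pos ((px0_iff hd tl x).mpr hD), if_pos hD]
          simp only [List.map_cons, hrest]
          norm_num
        · rw [if_neg (fun h => hD ((px0_iff hd tl x).mp h)), if_neg hD]
          simpa using hrest
      rw [hsplit, List.foldr_append]
      by_cases hD : D_eliminarUNO (hd :: tl) x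
      · rw [if_pos hD, if_pos hD]
        rw [hSfold]
        simp only [List.foldr_cons, List.foldr_nil]
        exact pyDel_neg_one _
      · rw [if_neg hD, if_neg hD]
        rw [hSfold]
        rfl

-- ===== VERDICT (by name: the statement is the Claim_ definition above) =====
theorem eliminarUNO_spec : Claim_unchanged_eliminarUNO := by
  intro lista x _ hD
  rw [a_eq, if_neg hD, alt_eq_gpair]

theorem eliminarUNO_changed : Claim_changed_eliminarUNO := by
  unfold Claim_changed_eliminarUNO; decide

theorem eliminarUNO_tight : Claim_exact_eliminarUNO := by
  intro lista x _ hD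
  rw [a_eq, if_pos hD, alt_eq_gpair]
  intro h
  have hne := gpair_ne_nil x lista hD.1
  have hlen := congrArg List.length h
  rw [List.length_dropLast] at hlen
  have : (gpair x lista).length = 0 := by omega
  exact hne (List.length_eq_zero_iff.mp this)
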